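-- pv_equiv track=rewrite | github.com/smmath/bigDataAlgorithms | big_data_algorithms/synopses/ams.py | actual_m2
-- ===== SOURCE A (Python) =====
-- def actual_m2(stream):
--     C = dict()
--     for i, x in enumerate(stream):
--         if x in C:
--             C[x] += 1
--         else:
--             C[x] = 1
--
--     return sum(map(lambda c: c**2, C.values()))
-- ===== SOURCE B (Python) =====
-- def actual_m2(stream):
--     C = {}
--     m2 = 0
--     for x in stream:
--         c = C.get(x, 0)
--         m2 += 2 * c + 1
--         C[x] = c + 1
--     return m2
-- ===== Notes on version B (the rewrite author's own statement) =====
-- stated objective: simpler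
-- what changed: B computes the second moment in one pass with a running total updated by the exact delta 2*c+1 per element, eliminating A's final sum-of-squares pass over the dict values.
import Mathlib
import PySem

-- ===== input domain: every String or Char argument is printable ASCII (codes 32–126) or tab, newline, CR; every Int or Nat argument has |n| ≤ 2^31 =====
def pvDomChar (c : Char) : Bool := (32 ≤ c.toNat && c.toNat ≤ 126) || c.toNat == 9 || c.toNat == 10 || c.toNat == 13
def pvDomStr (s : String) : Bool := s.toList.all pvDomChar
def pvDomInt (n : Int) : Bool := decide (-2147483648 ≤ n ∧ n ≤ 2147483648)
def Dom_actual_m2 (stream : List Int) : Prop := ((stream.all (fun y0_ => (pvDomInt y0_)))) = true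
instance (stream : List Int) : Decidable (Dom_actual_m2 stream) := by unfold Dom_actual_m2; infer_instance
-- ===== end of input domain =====

-- B replaces A's two passes (count into a dict, then sum squared values) by one pass with a
-- running total updated by the exact delta 2*c+1; objective: simpler (no speed claim).

-- ===== PORT A =====
def actual_m2 (stream : List Int) : Int :=
  let C := stream.foldl
    (fun C x => if C.contains x then C.modify x 0 (· + 1) else C.insert x 1)
    PySem.Dict.empty
  ((C.values.map (fun c => c ^ 2)).sum)

-- ===== PORT B =====
def actual_m2_alt (stream : List Int) : Int :=
  (stream.foldl
    (fun (s : PySem.Dict Int Int × Int) x =>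
      let c := s.1.getD x 0
      (s.1.insert x (c + 1), s.2 + (2 * c + 1)))
    (PySem.Dict.empty, 0)).2

-- ===== PRECONDITION & SPEC =====
def Spec_actual_m2 (stream : List Int) (out : Int) : Prop := out = actual_m2_alt stream
instance (stream : List Int) (out : Int) : Decidable (Spec_actual_m2 stream out) := by unfold Spec_actual_m2; infer_instance

-- ===== CLAIM (what is proved, stated in full; the proofs are below) =====
def Claim_equal_actual_m2 : Prop := ∀ (stream : List Int), Dom_actual_m2 stream → Spec_actual_m2 stream (actual_m2 stream)

-- ===== LEMMAS AND PROOFS =====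

-- sum of squared values of a dict
def sumSq (d : PySem.Dict Int Int) : Int := ((d.values.map (fun c => c ^ 2)).sum)

-- A's loop step equals the unconditional counting insert
theorem stepA_eq (C : PySem.Dict Int Int) (x : Int) :
    (if C.contains x then C.modify x 0 (· + 1) else C.insert x 1)
      = C.insert x (C.getD x 0 + 1) := by
  by_cases h : C.contains x = true
  · simp only [h, if_true]; rfl
  · rw [PySem.Dict.getD_of_not_contains C 0 (by simpa using h)]
    simp [h]

-- replacing the (unique) entry at key x, whose value is c, by c+1 changes the
-- sum of squared values by 2*c+1
theorem sumsq_replace (items : List (Int × Int)) (x c : Int)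
    (hnd : (items.map (·.1)).Nodup) (hmem : (x, c) ∈ items) :
    (((items.map (fun p => if p.1 == x then (x, c + 1) else p)).map (fun p => p.2 ^ 2)).sum)
      = ((items.map (fun p => p.2 ^ 2)).sum) + (2 * c + 1) := by
  induction items with
  | nil => cases hmem
  | cons p rest ih =>
    rw [List.map_cons, List.nodup_cons] at hnd
    rcases List.mem_cons.mp hmem with h | h
    · cases h.symm
      have hrest : ∀ q ∈ rest, (q.1 == x) = false := by
        intro q hq
        have hne : q.1 ≠ x := by
          intro e
          apply hnd.1
          simp only [List.mem_map]
          exact ⟨q, hq, by simpa using e⟩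
        simp [hne]
      have hid : rest.map (fun p => if p.1 == x then (x, c + 1) else p) = rest := by
        conv_rhs => rw [← List.map_id rest]
        exact List.map_congr_left (fun q hq => by simp [hrest q hq])
      simp only [List.map_cons, List.sum_cons, hid]
      simp
      ring
    · have hx : x ∈ rest.map (·.1) := by
        have := List.mem_map_of_mem (f := (·.1)) h
        simpa using this
      have hpx : (p.1 == x) = false := by
        have hne : p.1 ≠ x := by
          intro e
          apply hnd.1
          rw [e]
          exact hx
        simp [hne]
      have hkeep : (if (p.1 == x) = true then (x, c + 1) else p) = p := by simp [hpx]
      simp only [List.map_cons, List.sum_cons, hkeep]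
      rw [ih hnd.2 h]
      ring

theorem sumSq_insert (d : PySem.Dict Int Int) (x : Int) (hnd : d.keys.Nodup) :
    sumSq (d.insert x (d.getD x 0 + 1)) = sumSq d + (2 * (d.getD x 0) + 1) := by
  unfold sumSq
  simp only [PySem.Dict.keys] at hnd
  simp only [PySem.Dict.values]
  by_cases h : d.contains x = true
  · have hsome : (d.get? x).isSome = true := by
      rw [← PySem.Dict.contains_eq_isSome_get?]; exact h
    obtain ⟨v, hv⟩ := Option.isSome_iff_exists.mp hsome
    have hmem : (x, v) ∈ d.items := PySem.Dict.mem_items_of_get?_eq_some d hv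
    have hgetD : d.getD x 0 = v := PySem.Dict.getD_of_get?_eq_some d 0 hv
    rw [PySem.Dict.items_insert_of_contains d _ h, hgetD, List.map_map, List.map_map]
    have hrep := sumsq_replace d.items x v hnd hmem
    rw [List.map_map] at hrep
    simpa [Function.comp] using hrep
  · have h0 : d.getD x 0 = 0 := PySem.Dict.getD_of_not_contains d 0 (by simpa using h)
    rw [PySem.Dict.items_insert_of_not_contains d _ (by simpa using h)]
    simp [h0]

-- loop invariant: B's pair fold carries A's dict together with its sum of squares
theorem loop_inv (l : List Int) : ∀ (d : PySem.Dict Int Int) (m : Int),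
    d.keys.Nodup → m = sumSq d →
    (l.foldl (fun (s : PySem.Dict Int Int × Int) x =>
        (s.1.insert x (s.1.getD x 0 + 1), s.2 + (2 * s.1.getD x 0 + 1))) (d, m))
      = (l.foldl (fun C x => C.insert x (C.getD x 0 + 1)) d,
         sumSq (l.foldl (fun C x => C.insert x (C.getD x 0 + 1)) d)) := by
  induction l with
  | nil => intro d m _ hm; simp [hm]
  | cons x t ih =>
    intro d m hnd hm
    simp only [List.foldl_cons]
    exact ih _ _ (PySem.Dict.nodup_keys_insert _ _ _ hnd)
      (by rw [hm, sumSq_insert d x hnd])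

-- ===== VERDICT (by name: the statement is the Claim_ definition above) =====
theorem actual_m2_spec : Claim_equal_actual_m2 := by
  intro stream _
  unfold Spec_actual_m2 actual_m2 actual_m2_alt
  have hA : stream.foldl
      (fun (C : PySem.Dict Int Int) (x : Int) =>
        if C.contains x then C.modify x 0 (· + 1) else C.insert x 1)
      (PySem.Dict.empty : PySem.Dict Int Int)
    = stream.foldl (fun (C : PySem.Dict Int Int) x => C.insert x (C.getD x 0 + 1))
        (PySem.Dict.empty : PySem.Dict Int Int) := by
    exact PySem.List.foldl_congr_mem stream _ _ _ (fun acc x _ => stepA_eq acc x)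
  have hinv := loop_inv stream (PySem.Dict.empty : PySem.Dict Int Int) 0
    (PySem.Dict.nodup_keys_empty (κ := Int) (ν := Int)) rfl
  rw [hA, hinv]
  rfl
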